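-- pv_equiv track=rewrite | github.com/winvu88888888-maker/tinnam888888 | test_column_forensic.py | m_bigram
-- ===== SOURCE A (Python) =====
-- from collections import Counter, defaultdict
--
-- def m_transition(h, pos):
--     trans = defaultdict(Counter)
--     for i in range(len(h)-1):
--         trans[h[i][pos]][h[i+1][pos]] += 1
--     lv = h[-1][pos]
--     if lv in trans and trans[lv]:
--         return trans[lv].most_common(1)[0][0]
--     return lv
--
-- def m_bigram(h, pos):
--     if len(h) < 3: return h[-1][pos]
--     trans = defaultdict(Counter)
--     for i in range(len(h)-2):
--         key = (h[i][pos], h[i+1][pos])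
--         trans[key][h[i+2][pos]] += 1
--     key = (h[-2][pos], h[-1][pos])
--     if key in trans and trans[key]:
--         return trans[key].most_common(1)[0][0]
--     return m_transition(h, pos)
-- ===== SOURCE B (Python) =====
-- def m_bigram(h, pos):
--     # n-gram backoff: try the last-2 pattern, then the last-1 pattern, using
--     # slice comparisons and an argmax by repeated .count instead of Counter tables.
--     col = [row[pos] for row in h]
--     if len(col) < 3:
--         return col[-1]
--     for k in (2, 1):
--         pat = col[-k:]
--         succs = [col[i + k] for i in range(len(col) - k) if col[i:i + k] == pat]
--         if succs:
--             return max(dict.fromkeys(succs), key=succs.count)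
--     return col[-1]
-- ===== Notes on version B (the rewrite author's own statement) =====
-- stated objective: simpler
-- what changed: B replaces A's two defaultdict-of-Counters transition-table builders (bigram table plus the m_transition unigram table) by a unified n-gram backoff loop over the extracted column: for k in (2, 1) it collects the successors of the last-k slice pattern by slice comparison and picks the winner by argmax over the deduplicated successors with repeated .count, with no Counter and no dict at all. Pre_ requires a non-empty history and pos a valid index of every row; …
-- outside the precondition, e.g. on m_bigram([[], [3]], 0): A returns 3, B raises IndexError
import Mathlib
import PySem

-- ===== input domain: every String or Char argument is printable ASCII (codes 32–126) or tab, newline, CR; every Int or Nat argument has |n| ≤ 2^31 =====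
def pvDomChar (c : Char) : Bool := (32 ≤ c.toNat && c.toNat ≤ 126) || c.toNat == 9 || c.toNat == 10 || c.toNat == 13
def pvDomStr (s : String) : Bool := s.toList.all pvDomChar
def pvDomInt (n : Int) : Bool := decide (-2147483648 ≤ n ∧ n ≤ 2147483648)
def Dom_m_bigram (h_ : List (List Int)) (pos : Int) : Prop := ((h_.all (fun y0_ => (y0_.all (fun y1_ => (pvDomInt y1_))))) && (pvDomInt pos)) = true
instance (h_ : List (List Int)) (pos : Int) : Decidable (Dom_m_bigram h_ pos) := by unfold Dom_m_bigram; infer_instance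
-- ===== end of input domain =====

-- B replaces A's two defaultdict-of-Counters table builders by a unified n-gram backoff
-- (k = 2 then k = 1) over the extracted column: slice comparison collects the successors of
-- the last-k pattern, and the winner is picked by argmax over the deduplicated successors
-- with repeated .count — no Counter, no transition dict (simpler decomposition).

-- ===== PORT A =====
-- Counter.most_common(1)[0][0]: the first key attaining the maximal count (insertion order
-- breaks ties, exactly Python's stable reverse sort); the [] case is unreachable
-- (callers test non-emptiness first).
def pyMostCommon1 (c : PySem.Dict Int Int) : Int :=
  match c.items with
  | [] => 0
  | p :: rest => (rest.foldl (fun best q => if best.2 < q.2 then q else best) p).1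

def m_transition (h_ : List (List Int)) (pos : Int) : Int :=
  let trans := (PySem.List.pyRange 0 ((h_.length : Int) - 1) 1).foldl
    (fun tr i =>
      let a := PySem.List.pyGetD (PySem.List.pyGetD h_ i []) pos 0
      let b := PySem.List.pyGetD (PySem.List.pyGetD h_ (i + 1) []) pos 0
      tr.insert a ((tr.getD a PySem.Dict.empty).modify b 0 (· + 1)))
    (PySem.Dict.empty : PySem.Dict Int (PySem.Dict Int Int))
  let lv := PySem.List.pyGetD (PySem.List.pyGetD h_ (-1) []) pos 0
  if trans.contains lv && !(trans.getD lv PySem.Dict.empty).items.isEmpty then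
    pyMostCommon1 (trans.getD lv PySem.Dict.empty)
  else lv

def m_bigram (h_ : List (List Int)) (pos : Int) : Int :=
  if h_.length < 3 then PySem.List.pyGetD (PySem.List.pyGetD h_ (-1) []) pos 0
  else
    let trans := (PySem.List.pyRange 0 ((h_.length : Int) - 2) 1).foldl
      (fun tr i =>
        let key := (PySem.List.pyGetD (PySem.List.pyGetD h_ i []) pos 0,
                    PySem.List.pyGetD (PySem.List.pyGetD h_ (i + 1) []) pos 0)
        let c := PySem.List.pyGetD (PySem.List.pyGetD h_ (i + 2) []) pos 0
        tr.insert key ((tr.getD key PySem.Dict.empty).modify c 0 (· + 1)))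
      (PySem.Dict.empty : PySem.Dict (Int × Int) (PySem.Dict Int Int))
    let key := (PySem.List.pyGetD (PySem.List.pyGetD h_ (-2) []) pos 0,
                PySem.List.pyGetD (PySem.List.pyGetD h_ (-1) []) pos 0)
    if trans.contains key && !(trans.getD key PySem.Dict.empty).items.isEmpty then
      pyMostCommon1 (trans.getD key PySem.Dict.empty)
    else m_transition h_ pos

-- ===== PORT B =====
-- the list comprehension 'succs = [col[i+k] for i in range(len(col)-k) if col[i:i+k] == pat]'
-- with pat = col[-k:]; slices are PySem.List.slice (exact).
def altSuccs (col : List Int) (k : Nat) : List Int :=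
  let pat := PySem.List.slice col (some (-(k : Int)))
  (PySem.List.pyRange 0 ((col.length : Int) - (k : Int)) 1).foldl
    (fun acc i =>
      if PySem.List.slice col (some i) (some (i + (k : Int))) == pat
      then acc ++ [PySem.List.pyGetD col (i + (k : Int)) 0] else acc) []

-- one body of the 'for k in (2, 1)' loop: 'if succs: return max(dict.fromkeys(succs),
-- key=succs.count)' — dict.fromkeys is PySem.List.dedup, max(…, key=…) is PySem.List.max?
-- (first maximal element, exactly Python's max); none = this k produced no return.
def altPredict (col : List Int) (k : Nat) : Option Int :=
  let succs := altSuccs col k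
  if succs.isEmpty then none
  else PySem.List.max? (PySem.List.dedup succs) (fun v => (succs.count v : Int))

def m_bigram_alt (h_ : List (List Int)) (pos : Int) : Int :=
  let col := h_.map (fun row => PySem.List.pyGetD row pos 0)
  if col.length < 3 then PySem.List.pyGetD col (-1) 0
  else
    -- the two-iteration 'for k in (2, 1)' loop with early return, unrolled
    match altPredict col 2 with
    | some v => v
    | none =>
      match altPredict col 1 with
      | some v => v
      | none => PySem.List.pyGetD col (-1) 0

-- ===== PRECONDITION & SPEC =====
-- Pre_ excludes the inputs where A raises IndexError (empty history, or pos out of range for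
-- a row A indexes) and, in addition, histories of length < 3 containing a ragged row not
-- indexable by pos: there A returns the last row's value but B's column extraction raises.
def Pre_m_bigram (h_ : List (List Int)) (pos : Int) : Prop :=
  h_ ≠ [] ∧ ∀ row ∈ h_, PySem.Raise.InRange row.length pos
instance (h_ : List (List Int)) (pos : Int) : Decidable (Pre_m_bigram h_ pos) := by
  unfold Pre_m_bigram; infer_instance

def pvWitness_m_bigram : List (List Int) × Int := ([[1], [2], [1], [3]], 0)

def Spec_m_bigram (h_ : List (List Int)) (pos : Int) (out : Int) : Prop := out = m_bigram_alt h_ pos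
instance (h_ : List (List Int)) (pos : Int) (out : Int) : Decidable (Spec_m_bigram h_ pos out) := by
  unfold Spec_m_bigram; infer_instance

-- ===== CLAIM (what is proved, stated in full; the proofs are below) =====
def Claim_equal_m_bigram : Prop := ∀ (h_ : List (List Int)) (pos : Int), Dom_m_bigram h_ pos → Pre_m_bigram h_ pos → Spec_m_bigram h_ pos (m_bigram h_ pos)

-- ===== LEMMAS AND PROOFS =====

-- 'if p then some (f w) else none' filterMap is filter-then-map.
theorem filterMap_if_filter {α β : Type} (p : α → Bool) (f : α → β) (l : List α) :
    l.filterMap (fun w => if p w then some (f w) else none) = (l.filter p).map f := by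
  induction l with
  | nil => rfl
  | cons x t ih => by_cases h : p x <;> simp [h, ih]

-- h[i][pos] equals the extracted column's i-th entry, for an index in range.
theorem col_idx (h_ : List (List Int)) (pos : Int) (i : Int)
    (h0 : 0 ≤ i) (h1 : i < (h_.length : Int)) :
    PySem.List.pyGetD (PySem.List.pyGetD h_ i []) pos 0
      = PySem.List.pyGetD (h_.map (fun row => PySem.List.pyGetD row pos 0)) i 0 := by
  rw [PySem.List.pyGetD_eq_getElem h_ [] h0 h1,
      PySem.List.pyGetD_eq_getElem _ 0 h0 (by simpa using h1)]
  simp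

-- h[-k][pos] equals the column's -k entry.
theorem col_neg (h_ : List (List Int)) (pos : Int) (k : Nat) (hk : 0 < k) (hl : k ≤ h_.length) :
    PySem.List.pyGetD (PySem.List.pyGetD h_ (-(k : Int)) []) pos 0
      = PySem.List.pyGetD (h_.map (fun row => PySem.List.pyGetD row pos 0)) (-(k : Int)) 0 := by
  rw [PySem.List.pyGetD_neg_natCast h_ k [] hk hl,
      PySem.List.pyGetD_neg_natCast _ k 0 hk (by simpa using hl)]
  simp

-- A's index loop over range(len-2) is a structural fold over the 3-windows of the column.
theorem foldl_pyRange_window3 {β : Type} (xs : List Int) (f : β → ((Int × Int) × Int) → β) :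
    ∀ (m k : Nat) (init : β), xs.length ≤ k + m →
    (PySem.List.pyRange (k : Int) ((xs.length : Int) - 2) 1).foldl
      (fun acc i => f acc ((PySem.List.pyGetD xs i 0, PySem.List.pyGetD xs (i + 1) 0),
                            PySem.List.pyGetD xs (i + 2) 0)) init
    = (((xs.drop k).zip (xs.drop (k + 1))).zip (xs.drop (k + 2))).foldl f init := by
  intro m
  induction m with
  | zero =>
    intro k init hm
    have hr : PySem.List.pyRange (k : Int) ((xs.length : Int) - 2) 1 = [] := by
      simp [PySem.List.pyRange]; omega
    have hd : xs.drop k = [] := List.drop_eq_nil_of_le (by omega)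
    simp [hr, hd]
  | succ m ih =>
    intro k init hm
    by_cases hlt : (k : Int) < (xs.length : Int) - 2
    · have hk0 : k < xs.length := by omega
      have hk1 : k + 1 < xs.length := by omega
      have hk2 : k + 2 < xs.length := by omega
      have e1 : PySem.List.pyGetD xs (k : Int) 0 = xs[k] := by
        rw [PySem.List.pyGetD_natCast, List.getD_eq_getElem _ _ hk0]
      have e2 : PySem.List.pyGetD xs ((k : Int) + 1) 0 = xs[k + 1] := by
        have hc : ((k : Int) + 1) = ((k + 1 : Nat) : Int) := by push_cast; ring
        rw [hc, PySem.List.pyGetD_natCast, List.getD_eq_getElem _ _ hk1]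
      have e3 : PySem.List.pyGetD xs ((k : Int) + 2) 0 = xs[k + 2] := by
        have hc : ((k : Int) + 2) = ((k + 2 : Nat) : Int) := by push_cast; ring
        rw [hc, PySem.List.pyGetD_natCast, List.getD_eq_getElem _ _ hk2]
      have hcast : ((k : Int) + 1) = ((k + 1 : Nat) : Int) := by push_cast; ring
      have e4 : k + 2 + 1 = k + 1 + 2 := by omega
      have hz : ((xs.drop k).zip (xs.drop (k + 1))).zip (xs.drop (k + 2))
          = ((xs[k], xs[k + 1]), xs[k + 2]) ::
            (((xs.drop (k + 1)).zip (xs.drop (k + 1 + 1))).zip (xs.drop (k + 1 + 2))) := by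
        conv_lhs => rw [List.drop_eq_getElem_cons hk2, List.drop_eq_getElem_cons hk1,
                        List.drop_eq_getElem_cons hk0]
        rw [e4, List.zip_cons_cons, List.zip_cons_cons]
      rw [PySem.List.pyRange_one_cons hlt, List.foldl_cons]
      rw [e1, e2, e3, hcast, ih (k + 1) _ (by omega), hz, List.foldl_cons]
    · have hr : PySem.List.pyRange (k : Int) ((xs.length : Int) - 2) 1 = [] := by
        simp [PySem.List.pyRange]; omega
      have hd : xs.drop (k + 2) = [] := List.drop_eq_nil_of_le (by omega)
      simp [hr, hd]

-- the 2-window version for the unigram fallback.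
theorem foldl_pyRange_window2 {β : Type} (xs : List Int) (f : β → (Int × Int) → β) :
    ∀ (m k : Nat) (init : β), xs.length ≤ k + m →
    (PySem.List.pyRange (k : Int) ((xs.length : Int) - 1) 1).foldl
      (fun acc i => f acc (PySem.List.pyGetD xs i 0, PySem.List.pyGetD xs (i + 1) 0)) init
    = ((xs.drop k).zip (xs.drop (k + 1))).foldl f init := by
  intro m
  induction m with
  | zero =>
    intro k init hm
    have hr : PySem.List.pyRange (k : Int) ((xs.length : Int) - 1) 1 = [] := by
      simp [PySem.List.pyRange]; omega
    have hd : xs.drop k = [] := List.drop_eq_nil_of_le (by omega)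
    simp [hr, hd]
  | succ m ih =>
    intro k init hm
    by_cases hlt : (k : Int) < (xs.length : Int) - 1
    · have hk0 : k < xs.length := by omega
      have hk1 : k + 1 < xs.length := by omega
      have e1 : PySem.List.pyGetD xs (k : Int) 0 = xs[k] := by
        rw [PySem.List.pyGetD_natCast, List.getD_eq_getElem _ _ hk0]
      have e2 : PySem.List.pyGetD xs ((k : Int) + 1) 0 = xs[k + 1] := by
        have hc : ((k : Int) + 1) = ((k + 1 : Nat) : Int) := by push_cast; ring
        rw [hc, PySem.List.pyGetD_natCast, List.getD_eq_getElem _ _ hk1]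
      have hcast : ((k : Int) + 1) = ((k + 1 : Nat) : Int) := by push_cast; ring
      have hz : (xs.drop k).zip (xs.drop (k + 1))
          = (xs[k], xs[k + 1]) :: ((xs.drop (k + 1)).zip (xs.drop (k + 1 + 1))) := by
        conv_lhs => rw [List.drop_eq_getElem_cons hk1, List.drop_eq_getElem_cons hk0]
        rw [List.zip_cons_cons]
      rw [PySem.List.pyRange_one_cons hlt, List.foldl_cons]
      rw [e1, e2, hcast, ih (k + 1) _ (by omega), hz, List.foldl_cons]
    · have hr : PySem.List.pyRange (k : Int) ((xs.length : Int) - 1) 1 = [] := by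
        simp [PySem.List.pyRange]; omega
      have hd : xs.drop (k + 1) = [] := List.drop_eq_nil_of_le (by omega)
      simp [hr, hd]

-- the inner-table lookup of the defaultdict-of-Counters fold is the fold of the
-- filtered successor list.
theorem getD_build {κ : Type} [BEq κ] [LawfulBEq κ] [DecidableEq κ] (q : κ) :
    ∀ (ws : List (κ × Int)) (tr : PySem.Dict κ (PySem.Dict Int Int)),
    ((ws.foldl (fun tr w => tr.insert w.1 ((tr.getD w.1 PySem.Dict.empty).modify w.2 0 (· + 1))) tr).getD
        q PySem.Dict.empty)
      = (ws.filterMap (fun w => if w.1 == q then some w.2 else none)).foldl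
          (fun c x => c.modify x 0 (· + 1)) (tr.getD q PySem.Dict.empty) := by
  intro ws
  induction ws with
  | nil => intro tr; simp
  | cons w ws ih =>
    intro tr
    rw [List.foldl_cons, ih, List.filterMap_cons]
    by_cases hq : w.1 = q
    · simp [hq]
    · have hb : (w.1 == q) = false := beq_eq_false_iff_ne.mpr hq
      simp [hb, PySem.Dict.getD_insert, Ne.symm hq]

theorem contains_build {κ : Type} [BEq κ] [LawfulBEq κ] (q : κ) :
    ∀ (ws : List (κ × Int)) (tr : PySem.Dict κ (PySem.Dict Int Int)),
    ((ws.foldl (fun tr w => tr.insert w.1 ((tr.getD w.1 PySem.Dict.empty).modify w.2 0 (· + 1))) tr).contains q)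
      = (tr.contains q || ws.any (fun w => w.1 == q)) := by
  intro ws
  induction ws with
  | nil => intro tr; simp
  | cons w ws ih =>
    intro tr
    rw [List.foldl_cons, ih, PySem.Dict.contains_insert]
    by_cases hq : q = w.1
    · simp [hq]
    · have h1 : (q == w.1) = false := beq_eq_false_iff_ne.mpr hq
      have h2 : (w.1 == q) = false := beq_eq_false_iff_ne.mpr (Ne.symm hq)
      simp [h1, h2]

-- Counter(xs) is empty exactly when xs is.
theorem counter_items_nil {κ : Type} [BEq κ] [LawfulBEq κ] (xs : List κ) :
    (PySem.Dict.counter xs).items.isEmpty = xs.isEmpty := by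
  cases xs with
  | nil => rfl
  | cons x xs =>
    have hx : x ∈ (PySem.Dict.counter (x :: xs)).keys := by
      rw [PySem.Dict.keys_counter]
      exact (PySem.Set.mem_ofList _ _).mpr List.mem_cons_self
    rcases h : (PySem.Dict.counter (x :: xs)).items with _ | ⟨p, rest⟩
    · exfalso
      have hk : (PySem.Dict.counter (x :: xs)).keys = [] := by
        simp only [PySem.Dict.keys, h, List.map_nil]
      rw [hk] at hx; exact (List.not_mem_nil hx)
    · simp

-- the filtered successor list is empty iff no window matches the key.
theorem filterMap_key_nil {κ : Type} [BEq κ] [LawfulBEq κ] (q : κ) (ws : List (κ × Int)) :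
    ((ws.filterMap (fun w => if w.1 == q then some w.2 else none)).isEmpty
      = !ws.any (fun w => w.1 == q)) := by
  induction ws with
  | nil => rfl
  | cons w ws ih =>
    by_cases hq : w.1 = q
    · simp [hq]
    · simp [hq, ih]

-- Python max(xs, key) on a nonempty list is the first-maximal running fold.
theorem max?_cons {α κ : Type} [LT κ] [DecidableLT κ] (x : α) (t : List α) (key : α → κ) :
    PySem.List.max? (x :: t) key
      = some (t.foldl (fun m y => if key m < key y then y else m) x) := by
  have aux : ∀ (t : List α) (x : α),
      t.foldl (fun acc y => match acc with
        | none => some y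
        | some m => if key m < key y then some y else some m) (some x)
      = some (t.foldl (fun m y => if key m < key y then y else m) x) := by
    intro t
    induction t with
    | nil => intro x; rfl
    | cons y t ih =>
      intro x
      simp only [List.foldl_cons]
      by_cases h : key x < key y <;> simp [h, ih]
  simpa [PySem.List.max?] using aux t x

-- the pair-valued argmax fold carries (best key, its count).
theorem foldl_argmax_pair (cnt : Int → Int) :
    ∀ (l : List Int) (d : Int),
    l.foldl (fun (b : Int × Int) y => if b.2 < cnt y then (y, cnt y) else b) (d, cnt d)
      = (l.foldl (fun m y => if cnt m < cnt y then y else m) d,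
         cnt (l.foldl (fun m y => if cnt m < cnt y then y else m) d)) := by
  intro l
  induction l with
  | nil => intro d; rfl
  | cons y t ih =>
    intro d
    simp only [List.foldl_cons]
    by_cases h : cnt d < cnt y <;> simp [h, ih]

-- B's argmax-by-count over the deduplicated successors IS A's most_common(1)[0][0].
theorem mostCommon_eq_max (xs : List Int) (hne : xs ≠ []) :
    PySem.List.max? (PySem.List.dedup xs) (fun v => (xs.count v : Int))
      = some (pyMostCommon1 (PySem.Dict.counter xs)) := by
  have hd : PySem.List.dedup xs = PySem.Set.ofList xs := by
    simp [PySem.List.dedup_eq_ofList]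
  rcases hS : PySem.Set.ofList xs with _ | ⟨d, rest⟩
  · exfalso
    rcases xs with _ | ⟨z, t⟩
    · exact hne rfl
    · have : z ∈ PySem.Set.ofList (z :: t) :=
        (PySem.Set.mem_ofList _ _).mpr List.mem_cons_self
      rw [hS] at this
      exact List.not_mem_nil this
  · rw [hd, hS, max?_cons]
    unfold pyMostCommon1
    rw [PySem.Dict.items_counter, hS]
    simp only [List.map_cons, List.foldl_map]
    rw [show (fun (b : Int × Int) (y : Int) =>
          if b.2 < (y, (xs.count y : Int)).2 then (y, (xs.count y : Int)) else b)
        = (fun (b : Int × Int) y => if b.2 < (xs.count y : Int) then (y, (xs.count y : Int)) else b)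
      from rfl]
    rw [foldl_argmax_pair (fun v => (xs.count v : Int)) rest d]

-- the k = 2 pass collects exactly the successors of the last bigram.
theorem altSuccs_two (col : List Int) (h3 : 3 ≤ col.length) :
    altSuccs col 2
      = ((col.zip (col.drop 1)).zip (col.drop 2)).filterMap
          (fun w => if w.1 == (PySem.List.pyGetD col (-2) 0, PySem.List.pyGetD col (-1) 0)
                    then some w.2 else none) := by
  have e2 : PySem.List.pyGetD col (-2) 0 = col[col.length - 2] := by
    simpa using PySem.List.pyGetD_neg_natCast col 2 0 (by omega) (by omega)
  have e1 : PySem.List.pyGetD col (-1) 0 = col[col.length - 1] := by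
    simpa using PySem.List.pyGetD_neg_natCast col 1 0 (by omega) (by omega)
  have hL1 : col.length - 2 + 1 = col.length - 1 := by omega
  have hL2 : col.length - 1 + 1 = col.length := by omega
  have hpat : PySem.List.slice col (some (-((2 : Nat) : Int)))
      = [col[col.length - 2], col[col.length - 1]] := by
    rw [PySem.List.slice_from_neg_natCast col 2 (by omega),
        List.drop_eq_getElem_cons (by omega), hL1,
        List.drop_eq_getElem_cons (by omega), hL2, List.drop_length]
  unfold altSuccs
  rw [PySem.List.foldl_congr_mem _ _
    (fun acc i =>
      (fun (acc : List Int) (w : (Int × Int) × Int) =>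
        if w.1 == (col[col.length - 2], col[col.length - 1]) then acc ++ [w.2] else acc) acc
        ((PySem.List.pyGetD col i 0, PySem.List.pyGetD col (i + 1) 0),
          PySem.List.pyGetD col (i + 2) 0)) _ ?_]
  · have hw := foldl_pyRange_window3 col
      (fun (acc : List Int) (w : (Int × Int) × Int) =>
        if w.1 == (col[col.length - 2], col[col.length - 1]) then acc ++ [w.2] else acc)
      col.length 0 [] (by omega)
    simp only [Nat.cast_zero, List.drop_zero, Nat.zero_add] at hw
    rw [show ((2 : Nat) : Int) = (2 : Int) from rfl, hw,
        PySem.List.foldl_append_if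
          (fun (w : (Int × Int) × Int) => w.1 == (col[col.length - 2], col[col.length - 1]))
          (fun (w : (Int × Int) × Int) => w.2),
        ← filterMap_if_filter, e2, e1]
    simp
  · intro acc i hi
    rw [PySem.List.mem_pyRange_one] at hi
    obtain ⟨h0, hlt⟩ := hi
    obtain ⟨m, rfl⟩ : ∃ m : Nat, i = (m : Int) := ⟨i.toNat, by omega⟩
    have hm0 : m < col.length - 2 := by omega
    have g0 : PySem.List.pyGetD col (m : Int) 0 = col[m] := by
      rw [PySem.List.pyGetD_natCast, List.getD_eq_getElem _ _ (by omega)]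
    have g1 : PySem.List.pyGetD col ((m : Int) + 1) 0 = col[m + 1] := by
      rw [show ((m : Int) + 1) = ((m + 1 : Nat) : Int) from by push_cast; ring,
          PySem.List.pyGetD_natCast, List.getD_eq_getElem _ _ (by omega)]
    have g2 : PySem.List.pyGetD col ((m : Int) + 2) 0 = col[m + 2] := by
      rw [show ((m : Int) + 2) = ((m + 2 : Nat) : Int) from by push_cast; ring,
          PySem.List.pyGetD_natCast, List.getD_eq_getElem _ _ (by omega)]
    have hsl : PySem.List.slice col (some (m : Int)) (some ((m : Int) + ((2 : Nat) : Int)))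
        = [col[m], col[m + 1]] := by
      rw [PySem.List.slice_natCast_add col m 2,
          List.drop_eq_getElem_cons (by omega : m < col.length),
          List.drop_eq_getElem_cons (by omega : m + 1 < col.length),
          List.take_succ_cons, List.take_succ_cons, List.take_zero]
    simp only [hsl, hpat, g0, g1, List.cons_beq_cons]
    simp [g2]

-- the k = 1 pass collects exactly the successors of the last value.
theorem altSuccs_one (col : List Int) (h2 : 2 ≤ col.length) :
    altSuccs col 1
      = (col.zip (col.drop 1)).filterMap
          (fun w => if w.1 == PySem.List.pyGetD col (-1) 0 then some w.2 else none) := by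
  have e1 : PySem.List.pyGetD col (-1) 0 = col[col.length - 1] := by
    simpa using PySem.List.pyGetD_neg_natCast col 1 0 (by omega) (by omega)
  have hL2 : col.length - 1 + 1 = col.length := by omega
  have hpat : PySem.List.slice col (some (-((1 : Nat) : Int))) = [col[col.length - 1]] := by
    rw [PySem.List.slice_from_neg_natCast col 1 (by omega),
        List.drop_eq_getElem_cons (by omega), hL2, List.drop_length]
  unfold altSuccs
  rw [PySem.List.foldl_congr_mem _ _
    (fun acc i =>
      (fun (acc : List Int) (w : Int × Int) =>
        if w.1 == col[col.length - 1] then acc ++ [w.2] else acc) acc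
        (PySem.List.pyGetD col i 0, PySem.List.pyGetD col (i + 1) 0)) _ ?_]
  · have hw := foldl_pyRange_window2 col
      (fun (acc : List Int) (w : Int × Int) =>
        if w.1 == col[col.length - 1] then acc ++ [w.2] else acc)
      col.length 0 [] (by omega)
    simp only [Nat.cast_zero, List.drop_zero, Nat.zero_add] at hw
    rw [show ((1 : Nat) : Int) = (1 : Int) from rfl, hw,
        PySem.List.foldl_append_if
          (fun (w : Int × Int) => w.1 == col[col.length - 1])
          (fun (w : Int × Int) => w.2),
        ← filterMap_if_filter, e1]
    simp
  · intro acc i hi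
    rw [PySem.List.mem_pyRange_one] at hi
    obtain ⟨h0, hlt⟩ := hi
    obtain ⟨m, rfl⟩ : ∃ m : Nat, i = (m : Int) := ⟨i.toNat, by omega⟩
    have hm0 : m < col.length - 1 := by omega
    have g0 : PySem.List.pyGetD col (m : Int) 0 = col[m] := by
      rw [PySem.List.pyGetD_natCast, List.getD_eq_getElem _ _ (by omega)]
    have g1 : PySem.List.pyGetD col ((m : Int) + 1) 0 = col[m + 1] := by
      rw [show ((m : Int) + 1) = ((m + 1 : Nat) : Int) from by push_cast; ring,
          PySem.List.pyGetD_natCast, List.getD_eq_getElem _ _ (by omega)]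
    have hsl : PySem.List.slice col (some (m : Int)) (some ((m : Int) + ((1 : Nat) : Int)))
        = [col[m]] := by
      rw [PySem.List.slice_natCast_add col m 1,
          List.drop_eq_getElem_cons (by omega : m < col.length),
          List.take_succ_cons, List.take_zero]
    simp only [hsl, hpat, List.cons_beq_cons]
    simp [g0, g1]

-- the transition fallback of A, written over the column's filtered successor list.
theorem transition_eq (h_ : List (List Int)) (pos : Int) (hne : h_ ≠ []) :
    m_transition h_ pos =
      (let col := h_.map (fun row => PySem.List.pyGetD row pos 0)
       let lv := PySem.List.pyGetD col (-1) 0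
       let succs := (col.zip (col.drop 1)).filterMap
           (fun w => if w.1 == lv then some w.2 else none)
       if succs.isEmpty then lv else pyMostCommon1 (PySem.Dict.counter succs)) := by
  unfold m_transition
  set col := h_.map (fun row => PySem.List.pyGetD row pos 0) with hcol
  have hlen : col.length = h_.length := by simp [hcol]
  have hlv : PySem.List.pyGetD (PySem.List.pyGetD h_ (-1) []) pos 0
      = PySem.List.pyGetD col (-1) 0 := by
    have h1 := col_neg h_ pos 1 (by omega) (by
      cases h_ with | nil => exact absurd rfl hne | cons a l => simp)
    simpa [hcol] using h1
  have hstep : (PySem.List.pyRange 0 ((h_.length : Int) - 1) 1).foldl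
      (fun tr i =>
        let a := PySem.List.pyGetD (PySem.List.pyGetD h_ i []) pos 0
        let b := PySem.List.pyGetD (PySem.List.pyGetD h_ (i + 1) []) pos 0
        tr.insert a ((tr.getD a PySem.Dict.empty).modify b 0 (· + 1)))
      (PySem.Dict.empty : PySem.Dict Int (PySem.Dict Int Int))
    = ((col.zip (col.drop 1)).foldl
        (fun tr w => tr.insert w.1 ((tr.getD w.1 PySem.Dict.empty).modify w.2 0 (· + 1)))
        PySem.Dict.empty) := by
    rw [PySem.List.foldl_congr_mem _ _
      (fun acc i =>
        (fun (tr : PySem.Dict Int (PySem.Dict Int Int)) (w : Int × Int) =>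
          tr.insert w.1 ((tr.getD w.1 PySem.Dict.empty).modify w.2 0 (· + 1))) acc
          (PySem.List.pyGetD col i 0, PySem.List.pyGetD col (i + 1) 0)) _ ?_]
    · have hw := foldl_pyRange_window2 col
        (fun (tr : PySem.Dict Int (PySem.Dict Int Int)) (w : Int × Int) =>
          tr.insert w.1 ((tr.getD w.1 PySem.Dict.empty).modify w.2 0 (· + 1)))
        col.length 0 PySem.Dict.empty (by omega)
      simpa [hlen] using hw
    · intro acc i hi
      rw [PySem.List.mem_pyRange_one] at hi
      have e1 := col_idx h_ pos i hi.1 (by omega)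
      have e2 := col_idx h_ pos (i + 1) (by omega) (by omega)
      simp only [← hcol] at e1 e2
      simp [e1, e2]
  simp only [hstep, hlv]
  set lv := PySem.List.pyGetD col (-1) 0 with hlvdef
  set ws := col.zip (col.drop 1) with hws
  set succs := ws.filterMap (fun w => if w.1 == lv then some w.2 else none) with hsuccs
  have hgetD : ((ws.foldl
      (fun tr w => tr.insert w.1 ((tr.getD w.1 PySem.Dict.empty).modify w.2 0 (· + 1)))
      (PySem.Dict.empty : PySem.Dict Int (PySem.Dict Int Int))).getD lv PySem.Dict.empty)
      = PySem.Dict.counter succs := by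
    rw [getD_build lv ws PySem.Dict.empty, PySem.Dict.getD_empty, PySem.Dict.counter_eq_foldl]
  have hcontains : ((ws.foldl
      (fun tr w => tr.insert w.1 ((tr.getD w.1 PySem.Dict.empty).modify w.2 0 (· + 1)))
      (PySem.Dict.empty : PySem.Dict Int (PySem.Dict Int Int))).contains lv)
      = !succs.isEmpty := by
    rw [contains_build lv ws PySem.Dict.empty, PySem.Dict.contains_empty, Bool.false_or,
        ← Bool.not_not (ws.any _), ← filterMap_key_nil lv ws]
  simp only [hgetD, hcontains, counter_items_nil]
  by_cases hs : succs.isEmpty <;> simp [hs]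

-- ===== VERDICT (by name: the statement is the Claim_ definition above) =====
theorem m_bigram_spec : Claim_equal_m_bigram := by
  intro h_ pos _ hpre
  obtain ⟨hne, _⟩ := hpre
  unfold Spec_m_bigram m_bigram m_bigram_alt
  set col := h_.map (fun row => PySem.List.pyGetD row pos 0) with hcol
  have hlen : col.length = h_.length := by simp [hcol]
  have hlv : PySem.List.pyGetD (PySem.List.pyGetD h_ (-1) []) pos 0
      = PySem.List.pyGetD col (-1) 0 := by
    have h1 := col_neg h_ pos 1 (by omega) (by
      cases h_ with | nil => exact absurd rfl hne | cons a l => simp)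
    simpa [hcol] using h1
  by_cases h3 : h_.length < 3
  · simp only [hlen, if_pos h3, hlv]
  · simp only [hlen, if_neg h3]
    have hpen : PySem.List.pyGetD (PySem.List.pyGetD h_ (-2) []) pos 0
        = PySem.List.pyGetD col (-2) 0 := by
      have h2 := col_neg h_ pos 2 (by omega) (by omega)
      simp only [← hcol] at h2
      norm_num at h2
      exact h2
    have hstep : (PySem.List.pyRange 0 ((h_.length : Int) - 2) 1).foldl
        (fun tr i =>
          let key := (PySem.List.pyGetD (PySem.List.pyGetD h_ i []) pos 0,
                      PySem.List.pyGetD (PySem.List.pyGetD h_ (i + 1) []) pos 0)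
          let c := PySem.List.pyGetD (PySem.List.pyGetD h_ (i + 2) []) pos 0
          tr.insert key ((tr.getD key PySem.Dict.empty).modify c 0 (· + 1)))
        (PySem.Dict.empty : PySem.Dict (Int × Int) (PySem.Dict Int Int))
      = ((((col.zip (col.drop 1)).zip (col.drop 2)).foldl
          (fun tr w => tr.insert w.1 ((tr.getD w.1 PySem.Dict.empty).modify w.2 0 (· + 1)))
          PySem.Dict.empty)) := by
      rw [PySem.List.foldl_congr_mem _ _
        (fun acc i =>
          (fun (tr : PySem.Dict (Int × Int) (PySem.Dict Int Int)) (w : (Int × Int) × Int) =>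
            tr.insert w.1 ((tr.getD w.1 PySem.Dict.empty).modify w.2 0 (· + 1))) acc
            ((PySem.List.pyGetD col i 0, PySem.List.pyGetD col (i + 1) 0),
              PySem.List.pyGetD col (i + 2) 0)) _ ?_]
      · have hw := foldl_pyRange_window3 col
          (fun (tr : PySem.Dict (Int × Int) (PySem.Dict Int Int)) (w : (Int × Int) × Int) =>
            tr.insert w.1 ((tr.getD w.1 PySem.Dict.empty).modify w.2 0 (· + 1)))
          col.length 0 PySem.Dict.empty (by omega)
        simpa [hlen] using hw
      · intro acc i hi
        rw [PySem.List.mem_pyRange_one] at hi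
        have e1 := col_idx h_ pos i hi.1 (by omega)
        have e2 := col_idx h_ pos (i + 1) (by omega) (by omega)
        have e3 := col_idx h_ pos (i + 2) (by omega) (by omega)
        simp only [← hcol] at e1 e2 e3
        simp [e1, e2, e3]
    simp only [hstep, hlv, hpen]
    set key := (PySem.List.pyGetD col (-2) 0, PySem.List.pyGetD col (-1) 0) with hkeydef
    set ws := (col.zip (col.drop 1)).zip (col.drop 2) with hws
    set succs := ws.filterMap (fun w => if w.1 == key then some w.2 else none) with hsuccs
    set lv := PySem.List.pyGetD col (-1) 0 with hlvdef
    set succs2 := (col.zip (col.drop 1)).filterMap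
        (fun w => if w.1 == lv then some w.2 else none) with hsuccs2
    have hgetD : ((ws.foldl
        (fun tr w => tr.insert w.1 ((tr.getD w.1 PySem.Dict.empty).modify w.2 0 (· + 1)))
        (PySem.Dict.empty : PySem.Dict (Int × Int) (PySem.Dict Int Int))).getD key PySem.Dict.empty)
        = PySem.Dict.counter succs := by
      rw [getD_build key ws PySem.Dict.empty, PySem.Dict.getD_empty, PySem.Dict.counter_eq_foldl]
    have hcontains : ((ws.foldl
        (fun tr w => tr.insert w.1 ((tr.getD w.1 PySem.Dict.empty).modify w.2 0 (· + 1)))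
        (PySem.Dict.empty : PySem.Dict (Int × Int) (PySem.Dict Int Int))).contains key)
        = !succs.isEmpty := by
      rw [contains_build key ws PySem.Dict.empty, PySem.Dict.contains_empty, Bool.false_or,
          ← Bool.not_not (ws.any _), ← filterMap_key_nil key ws]
    have hA2 : altSuccs col 2 = succs := by
      rw [altSuccs_two col (by omega), hsuccs, hws, hkeydef]
    have hA1 : altSuccs col 1 = succs2 := by
      rw [altSuccs_one col (by omega), hsuccs2, hlvdef]
    have hP2 : altPredict col 2
        = if succs.isEmpty then none else some (pyMostCommon1 (PySem.Dict.counter succs)) := by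
      simp only [altPredict, hA2]
      by_cases hs : succs.isEmpty
      · simp [hs]
      · rw [if_neg hs, if_neg hs, mostCommon_eq_max succs (by
          intro h0; rw [h0] at hs; exact hs rfl)]
    have hP1 : altPredict col 1
        = if succs2.isEmpty then none else some (pyMostCommon1 (PySem.Dict.counter succs2)) := by
      simp only [altPredict, hA1]
      by_cases hs : succs2.isEmpty
      · simp [hs]
      · rw [if_neg hs, if_neg hs, mostCommon_eq_max succs2 (by
          intro h0; rw [h0] at hs; exact hs rfl)]
    simp only [hgetD, hcontains, counter_items_nil, hP2, hP1]
    by_cases hs : succs.isEmpty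
    · simp only [hs, Bool.not_true, Bool.false_and, Bool.false_eq_true, if_false, if_true]
      rw [transition_eq h_ pos hne]
      simp only [← hcol, ← hlvdef, ← hsuccs2]
      by_cases hs2 : succs2.isEmpty <;> simp [hs2]
    · have hs' : succs.isEmpty = false := by revert hs; cases succs.isEmpty <;> simp
      simp [hs']
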